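-- pv_equiv track=rewrite | github.com/zejdajan/mrs_simulation | scripts/mrs_drone_spawner.py | get_vehicle_type
-- ===== SOURCE A (Python) =====
-- DEFAULT_VEHICLE_TYPE = 't650'
--
-- VEHICLE_TYPES = ['f450', 'f550', 't650', 'eaglemk2']
--
-- def get_vehicle_type(params_list):
--     vehicle_type = DEFAULT_VEHICLE_TYPE
--     for p in params_list:
--         for v in VEHICLE_TYPES:
--             if v in p:
--                 vehicle_type = v
--                 break
--     return vehicle_type
-- ===== SOURCE B (Python) =====
-- DEFAULT_VEHICLE_TYPE = 't650'
--
-- VEHICLE_TYPES = ['f450', 'f550', 't650', 'eaglemk2']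
--
-- def get_vehicle_type(params_list):
--     for p in reversed(params_list):
--         for v in VEHICLE_TYPES:
--             if v in p:
--                 return v
--     return DEFAULT_VEHICLE_TYPE
-- ===== Notes on version B (the rewrite author's own statement) =====
-- stated objective: alternative
-- what changed: Replaces the forward scan-all-and-overwrite accumulator with a reverse traversal that returns immediately on the first (i.e. last forward) matching parameter, keeping the inner first-listed-type choice.
import Mathlib
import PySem

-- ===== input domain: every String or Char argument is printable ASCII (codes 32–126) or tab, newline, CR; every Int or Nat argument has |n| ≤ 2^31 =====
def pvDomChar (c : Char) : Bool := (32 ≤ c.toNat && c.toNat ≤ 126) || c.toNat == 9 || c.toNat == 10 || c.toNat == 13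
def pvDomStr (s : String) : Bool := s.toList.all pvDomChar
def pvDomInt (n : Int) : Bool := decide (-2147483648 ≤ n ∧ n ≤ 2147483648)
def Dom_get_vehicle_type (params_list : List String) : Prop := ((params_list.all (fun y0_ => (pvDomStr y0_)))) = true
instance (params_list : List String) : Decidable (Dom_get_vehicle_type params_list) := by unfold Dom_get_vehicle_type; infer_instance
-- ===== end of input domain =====

-- B replaces A's forward scan-all-and-overwrite accumulator by a reverse traversal with
-- early return (alternative decomposition, same worst-case cost).

def DEFAULT_VEHICLE_TYPE : String := "t650"

def VEHICLE_TYPES : List String := ["f450", "f550", "t650", "eaglemk2"]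

-- ===== PORT A =====
-- inner 'for v in VEHICLE_TYPES: if v in p: vehicle_type = v; break'
def pvInnerA (p : String) (acc : String) : List String → String
  | [] => acc
  | v :: rest => if PySem.Str.isIn v p then v else pvInnerA p acc rest

def get_vehicle_type (params_list : List String) : String :=
  params_list.foldl (fun acc p => pvInnerA p acc VEHICLE_TYPES) DEFAULT_VEHICLE_TYPE

-- ===== PORT B =====
-- inner 'for v in VEHICLE_TYPES: if v in p: return v'
def pvFirstMatch? (p : String) : List String → Option String
  | [] => none
  | v :: rest => if PySem.Str.isIn v p then some v else pvFirstMatch? p rest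

-- 'for p in reversed(params_list): … return v' then the default
def pvGoB : List String → String
  | [] => DEFAULT_VEHICLE_TYPE
  | p :: rest =>
    match pvFirstMatch? p VEHICLE_TYPES with
    | some v => v
    | none => pvGoB rest

def get_vehicle_type_alt (params_list : List String) : String :=
  pvGoB params_list.reverse

-- ===== PRECONDITION & SPEC =====
def Spec_get_vehicle_type (params_list : List String) (out : String) : Prop := out = get_vehicle_type_alt params_list
instance (params_list : List String) (out : String) : Decidable (Spec_get_vehicle_type params_list out) := by unfold Spec_get_vehicle_type; infer_instance

-- ===== CLAIM (what is proved, stated in full; the proofs are below) =====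
def Claim_equal_get_vehicle_type : Prop := ∀ (params_list : List String), Dom_get_vehicle_type params_list → Spec_get_vehicle_type params_list (get_vehicle_type params_list)

-- ===== LEMMAS AND PROOFS =====

-- result of A's scan over xs as an Option: the last parameter's match wins
def pvLastOpt : List String → Option String
  | [] => none
  | p :: rest =>
    match pvLastOpt rest with
    | some v => some v
    | none => pvFirstMatch? p VEHICLE_TYPES

-- forward first-match over a list
def pvFOpt : List String → Option String
  | [] => none
  | p :: rest => Option.orElse (pvFirstMatch? p VEHICLE_TYPES) (fun _ => pvFOpt rest)

theorem pvInnerA_eq_firstMatch (p acc : String) (ts : List String) :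
    pvInnerA p acc ts = (pvFirstMatch? p ts).getD acc := by
  induction ts with
  | nil => rfl
  | cons v rest ih =>
    simp only [pvInnerA, pvFirstMatch?]
    split <;> simp [ih]

theorem foldl_eq_lastOpt (xs : List String) (acc : String) :
    xs.foldl (fun acc p => pvInnerA p acc VEHICLE_TYPES) acc = (pvLastOpt xs).getD acc := by
  induction xs generalizing acc with
  | nil => rfl
  | cons p rest ih =>
    rw [List.foldl_cons, ih, pvInnerA_eq_firstMatch]
    simp only [pvLastOpt]
    cases pvLastOpt rest <;> simp

theorem pvGoB_eq_fopt (l : List String) : pvGoB l = (pvFOpt l).getD DEFAULT_VEHICLE_TYPE := by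
  induction l with
  | nil => rfl
  | cons p rest ih =>
    simp only [pvGoB, pvFOpt]
    cases pvFirstMatch? p VEHICLE_TYPES <;> simp [ih, Option.orElse]

theorem pvFOpt_append (l : List String) (p : String) :
    pvFOpt (l ++ [p]) = Option.orElse (pvFOpt l) (fun _ => pvFirstMatch? p VEHICLE_TYPES) := by
  induction l with
  | nil => simp [pvFOpt]
  | cons q rest ih =>
    simp only [List.cons_append, pvFOpt, ih]
    cases pvFirstMatch? q VEHICLE_TYPES <;> simp [Option.orElse]

theorem pvFOpt_reverse (xs : List String) : pvFOpt xs.reverse = pvLastOpt xs := by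
  induction xs with
  | nil => rfl
  | cons p rest ih =>
    rw [List.reverse_cons, pvFOpt_append, ih]
    simp only [pvLastOpt]
    cases pvLastOpt rest <;> simp [Option.orElse]

-- ===== VERDICT (by name: the statement is the Claim_ definition above) =====
theorem get_vehicle_type_spec : Claim_equal_get_vehicle_type := by
  intro params_list _
  unfold Spec_get_vehicle_type get_vehicle_type get_vehicle_type_alt
  rw [foldl_eq_lastOpt, pvGoB_eq_fopt, pvFOpt_reverse]
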